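-- pv_equiv track=rewrite | github.com/apiechowicz/nlp | hw-5/main.py | count_event_occurrences
-- ===== SOURCE A (Python) =====
-- from typing import List, Tuple, Dict
--
-- def count_event_occurrences(bigram_frequency_list: List[Tuple[str, int]]) -> Dict[str, Tuple[int, int]]:
--     event_occurrences = dict()
--     # word -> (number of occurrences as first element, number of occurrences as second element)
--     for phrase, count in bigram_frequency_list:
--         a, b = phrase.split(' ')
--         try:
--             event_occurrences[a] = (event_occurrences[a][0] + count, event_occurrences[a][1])
--         except KeyError:
--             event_occurrences[a] = (count, 0)
--         try:
--             event_occurrences[b] = (event_occurrences[b][0], event_occurrences[b][1] + count)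
--         except KeyError:
--             event_occurrences[b] = (0, count)
--     return event_occurrences
-- ===== SOURCE B (Python) =====
-- def count_event_occurrences(bigram_frequency_list):
--     # Build two separate count tables in one pass, then merge them over the
--     # words in order of first appearance (dict.fromkeys keeps that order).
--     first = {}
--     second = {}
--     for phrase, count in bigram_frequency_list:
--         a, b = phrase.split(' ')
--         first[a] = first.get(a, 0) + count
--         second[b] = second.get(b, 0) + count
--     words = dict.fromkeys(w for phrase, _ in bigram_frequency_list
--                             for w in phrase.split(' '))
--     return {w: (first.get(w, 0), second.get(w, 0)) for w in words}
-- ===== Notes on version B (the rewrite author's own statement) =====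
-- stated objective: alternative
-- what changed: Instead of updating (first,second) tuples inline in one dict with try/except, B builds two separate count tables in one loop and then merges them over the words in first-appearance order.
import Mathlib
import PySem

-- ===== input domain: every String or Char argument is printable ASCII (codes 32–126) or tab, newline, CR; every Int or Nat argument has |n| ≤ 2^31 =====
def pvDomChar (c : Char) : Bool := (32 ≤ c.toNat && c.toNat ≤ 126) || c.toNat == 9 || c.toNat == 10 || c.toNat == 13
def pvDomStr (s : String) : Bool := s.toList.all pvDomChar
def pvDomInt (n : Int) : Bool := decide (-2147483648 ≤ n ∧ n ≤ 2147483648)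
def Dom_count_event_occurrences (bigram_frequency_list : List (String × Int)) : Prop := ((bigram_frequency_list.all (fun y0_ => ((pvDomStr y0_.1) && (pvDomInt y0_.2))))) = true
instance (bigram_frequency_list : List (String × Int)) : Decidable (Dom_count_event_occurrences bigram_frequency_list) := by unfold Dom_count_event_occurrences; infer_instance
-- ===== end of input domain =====

-- B builds two separate count tables and merges them over the words in first-appearance
-- order, instead of A's inline tuple updates in one dict (objective: alternative decomposition).

-- ===== PORT A =====
-- event_occurrences[a] update (try/except KeyError on the FIRST component)
def pvUpd1 (d : PySem.Dict String (Int × Int)) (a : String) (c : Int) : PySem.Dict String (Int × Int) :=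
  match d.get? a with
  | some v => d.insert a (v.1 + c, v.2)
  | none   => d.insert a (c, 0)

-- event_occurrences[b] update (try/except KeyError on the SECOND component)
def pvUpd2 (d : PySem.Dict String (Int × Int)) (b : String) (c : Int) : PySem.Dict String (Int × Int) :=
  match d.get? b with
  | some v => d.insert b (v.1, v.2 + c)
  | none   => d.insert b (0, c)

-- one loop iteration of A; the `_ => d` branch is Python's ValueError on unpacking
-- (phrase.split(' ') not of length 2), excluded by Pre_
def pvAStep (d : PySem.Dict String (Int × Int)) (p : String × Int) : PySem.Dict String (Int × Int) :=
  match PySem.Str.split? p.1 " " with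
  | some [a, b] => pvUpd2 (pvUpd1 d a p.2) b p.2
  | _ => d

def count_event_occurrences (bigram_frequency_list : List (String × Int)) : List (String × Int × Int) :=
  (bigram_frequency_list.foldl pvAStep PySem.Dict.empty).items

-- ===== PORT B =====
-- first[a] = first.get(a, 0) + count  (ValueError phrases contribute nothing; excluded by Pre_)
def pvFirstStep (d : PySem.Dict String Int) (p : String × Int) : PySem.Dict String Int :=
  match PySem.Str.split? p.1 " " with
  | some [a, _] => d.insert a (d.getD a 0 + p.2)
  | _ => d

-- second[b] = second.get(b, 0) + count
def pvSecondStep (d : PySem.Dict String Int) (p : String × Int) : PySem.Dict String Int :=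
  match PySem.Str.split? p.1 " " with
  | some [_, b] => d.insert b (d.getD b 0 + p.2)
  | _ => d

-- the flattened word stream of the generator in Source B
def pvFlat (l : List (String × Int)) : List String :=
  l.flatMap (fun p => (PySem.Str.split? p.1 " ").getD [])

def count_event_occurrences_alt (bigram_frequency_list : List (String × Int)) : List (String × Int × Int) :=
  let first := bigram_frequency_list.foldl pvFirstStep PySem.Dict.empty
  let second := bigram_frequency_list.foldl pvSecondStep PySem.Dict.empty
  let words := PySem.List.dedup (pvFlat bigram_frequency_list)
  words.map (fun w => (w, first.getD w 0, second.getD w 0))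

-- ===== PRECONDITION & SPEC =====
-- Pre_ excludes exactly the inputs where Python raises ValueError: a phrase whose
-- split(' ') does not have exactly two pieces (too many words, missing space, double space).
def Pre_count_event_occurrences (bigram_frequency_list : List (String × Int)) : Prop :=
  ∀ p ∈ bigram_frequency_list, ((PySem.Str.split? p.1 " ").getD []).length = 2
instance (bigram_frequency_list : List (String × Int)) : Decidable (Pre_count_event_occurrences bigram_frequency_list) := by unfold Pre_count_event_occurrences; infer_instance

def pvWitness_count_event_occurrences : (List (String × Int)) := [("a b", 2), ("b a", 3), ("a b", 1)]

def Spec_count_event_occurrences (bigram_frequency_list : List (String × Int)) (out : List (String × Int × Int)) : Prop := out = count_event_occurrences_alt bigram_frequency_list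
instance (bigram_frequency_list : List (String × Int)) (out : List (String × Int × Int)) : Decidable (Spec_count_event_occurrences bigram_frequency_list out) := by unfold Spec_count_event_occurrences; infer_instance

-- ===== CLAIM (what is proved, stated in full; the proofs are below) =====
def Claim_equal_count_event_occurrences : Prop := ∀ (bigram_frequency_list : List (String × Int)), Dom_count_event_occurrences bigram_frequency_list → Pre_count_event_occurrences bigram_frequency_list → Spec_count_event_occurrences bigram_frequency_list (count_event_occurrences bigram_frequency_list)

-- ===== LEMMAS AND PROOFS =====

lemma pv_split_two {s : String} (h : ((PySem.Str.split? s " ").getD []).length = 2) :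
    ∃ a b, PySem.Str.split? s " " = some [a, b] := by
  cases hs : PySem.Str.split? s " " with
  | none => rw [hs] at h; simp at h
  | some l =>
    rw [hs] at h
    simp only [Option.getD_some] at h
    obtain ⟨a, b, rfl⟩ := List.length_eq_two.mp h
    exact ⟨a, b, rfl⟩

lemma pvUpd1_getD (d : PySem.Dict String (Int × Int)) (a : String) (c : Int) (w : String) :
    (pvUpd1 d a c).getD w (0, 0) =
      if w = a then ((d.getD a (0, 0)).1 + c, (d.getD a (0, 0)).2) else d.getD w (0, 0) := by
  unfold pvUpd1
  cases h : d.get? a with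
  | some v =>
    rw [PySem.Dict.getD_of_get?_eq_some d (0, 0) h]
    simp [PySem.Dict.getD_insert]
  | none =>
    rw [PySem.Dict.getD_of_get?_eq_none d (0, 0) h]
    simp [PySem.Dict.getD_insert]

lemma pvUpd2_getD (d : PySem.Dict String (Int × Int)) (b : String) (c : Int) (w : String) :
    (pvUpd2 d b c).getD w (0, 0) =
      if w = b then ((d.getD b (0, 0)).1, (d.getD b (0, 0)).2 + c) else d.getD w (0, 0) := by
  unfold pvUpd2
  cases h : d.get? b with
  | some v =>
    rw [PySem.Dict.getD_of_get?_eq_some d (0, 0) h]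
    simp [PySem.Dict.getD_insert]
  | none =>
    rw [PySem.Dict.getD_of_get?_eq_none d (0, 0) h]
    simp [PySem.Dict.getD_insert]

-- any dict produced by pvUpd1/pvUpd2 is an insert, so keys grow like Set.add
lemma pv_keys_insert_add (d : PySem.Dict String (Int × Int)) (k : String) (v : Int × Int) :
    (d.insert k v).keys = PySem.Set.add d.keys k := by
  by_cases h : d.contains k = true
  · rw [PySem.Dict.keys_insert_of_contains d v h]
    have hm : k ∈ d.keys := (PySem.Dict.contains_iff_mem_keys d k).1 h
    simp [PySem.Set.add, hm]
  · have h' : d.contains k = false := by simpa using h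
    rw [PySem.Dict.keys_insert_of_not_contains d v h']
    have hm : k ∉ d.keys := fun hc => h ((PySem.Dict.contains_iff_mem_keys d k).2 hc)
    simp [PySem.Set.add, hm]

lemma pv_keys_foldl (l : List (String × Int)) :
    ∀ d : PySem.Dict String (Int × Int),
      (∀ p ∈ l, ((PySem.Str.split? p.1 " ").getD []).length = 2) →
      (l.foldl pvAStep d).keys = PySem.Set.update d.keys (pvFlat l) := by
  induction l with
  | nil => intro d _; simp [pvFlat, PySem.Set.update]
  | cons p t ih =>
    intro d hok
    obtain ⟨a, b, hab⟩ := pv_split_two (hok p (by simp))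
    have hflat : pvFlat (p :: t) = [a, b] ++ pvFlat t := by
      simp [pvFlat, hab]
    have hstep : pvAStep d p = pvUpd2 (pvUpd1 d a p.2) b p.2 := by
      simp [pvAStep, hab]
    have hkeys : (pvAStep d p).keys = PySem.Set.update d.keys [a, b] := by
      rw [hstep]
      unfold pvUpd2
      cases (pvUpd1 d a p.2).get? b <;>
        · unfold pvUpd1
          cases d.get? a <;>
            simp [pv_keys_insert_add, PySem.Set.update]
    rw [List.foldl_cons, ih _ (fun q hq => hok q (by simp [hq])), hkeys, hflat,
      PySem.Set.update, PySem.Set.update, PySem.Set.update, List.foldl_append]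

lemma pv_getD_foldl (l : List (String × Int)) :
    ∀ (d : PySem.Dict String (Int × Int)) (f s : PySem.Dict String Int),
      (∀ p ∈ l, ((PySem.Str.split? p.1 " ").getD []).length = 2) →
      (∀ w, d.getD w (0, 0) = (f.getD w 0, s.getD w 0)) →
      ∀ w, (l.foldl pvAStep d).getD w (0, 0) =
        ((l.foldl pvFirstStep f).getD w 0, (l.foldl pvSecondStep s).getD w 0) := by
  induction l with
  | nil => intro d f s _ hinv w; simpa using hinv w
  | cons p t ih =>
    intro d f s hok hinv
    obtain ⟨a, b, hab⟩ := pv_split_two (hok p (by simp))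
    simp only [List.foldl_cons]
    apply ih _ _ _ (fun q hq => hok q (by simp [hq]))
    intro w
    simp only [pvAStep, pvFirstStep, pvSecondStep, hab]
    rw [pvUpd2_getD, pvUpd1_getD, pvUpd1_getD]
    simp only [PySem.Dict.getD_insert, hinv]
    by_cases hwb : w = b <;> by_cases hwa : w = a <;> by_cases hba : b = a <;>
      simp_all

-- ===== VERDICT (by name: the statement is the Claim_ definition above) =====
theorem count_event_occurrences_spec : Claim_equal_count_event_occurrences := by
  intro l _ hpre
  unfold Spec_count_event_occurrences count_event_occurrences count_event_occurrences_alt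
  have hkeys : (l.foldl pvAStep PySem.Dict.empty).keys = PySem.List.dedup (pvFlat l) := by
    rw [pv_keys_foldl l _ hpre]
    simp [PySem.List.dedup, PySem.Set.ofList, PySem.Set.update, PySem.Dict.keys_empty,
      PySem.Set.empty]
  have hnd : (l.foldl pvAStep PySem.Dict.empty).keys.Nodup := by
    rw [hkeys]; exact PySem.List.nodup_dedup _
  rw [PySem.Dict.items_eq_map_keys _ hnd (0, 0), hkeys]
  apply List.map_congr_left
  intro w _
  rw [pv_getD_foldl l PySem.Dict.empty PySem.Dict.empty PySem.Dict.empty hpre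
    (fun w => by simp [PySem.Dict.getD_empty]) w]
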